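-- pv_equiv track=rewrite | github.com/Don12138/poly-chemprop | chemprop/models/layers.py | get_unit_sequence
-- ===== SOURCE A (Python) =====
-- def get_unit_sequence(input_dim, output_dim, n_hidden):
--     """
--     Smoothly decay the number of hidden units in each layer.
--     Start from 'input_dim' and end with 'output_dim'.
--
--     Examples:
--     get_unit_sequence(1,1024,4) = [1, 4, 16, 64, 256, 1024]
--     get_unit_sequence(1024,1,4) = [1024, 256, 64, 16, 4, 1]
--     """
--     reverse = False
--     if input_dim > output_dim:
--         reverse = True
--         input_dim,output_dim = output_dim,input_dim
--
--     diff = abs(output_dim.bit_length() - input_dim.bit_length())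
--     increment = diff // (n_hidden+1)
--
--     sequence = [input_dim] + [0] * (n_hidden) + [output_dim]
--
--     for idx in range(n_hidden // 2):
--         sequence[idx+1] = 2 ** ((sequence[idx]).bit_length() + increment-1)
--         sequence[-2-idx] = 2 ** ((sequence[-1-idx]-1).bit_length() - increment)
--
--     if n_hidden%2 == 1:
--         sequence[n_hidden // 2 + 1] = (sequence[n_hidden // 2] + sequence[n_hidden // 2+2])//2
--
--     if reverse:
--         sequence.reverse()
--
--     return sequence
-- ===== SOURCE B (Python) =====
-- def get_unit_sequence(input_dim, output_dim, n_hidden):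
--     """
--     Smoothly decay the number of hidden units in each layer.
--     Start from 'input_dim' and end with 'output_dim'.
--     Closed form: each unit is a standalone power of two, no recurrence.
--     """
--     rev = input_dim > output_dim
--     lo, hi = (output_dim, input_dim) if rev else (input_dim, output_dim)
--     increment = abs(hi.bit_length() - lo.bit_length()) // (n_hidden + 1)
--     half = n_hidden // 2
--     front = [2 ** (lo.bit_length() + k * increment - 1) for k in range(1, half + 1)]
--     back = [2 ** ((hi - 1).bit_length() - k * increment) for k in range(1, half + 1)]
--     mid = []
--     if n_hidden % 2 == 1:
--         left = front[-1] if front else lo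
--         right = back[-1] if back else hi
--         mid = [(left + right) // 2]
--     seq = [lo] + front + mid + back[::-1] + [hi]
--     if rev:
--         seq.reverse()
--     return seq
-- ===== Notes on version B (the rewrite author's own statement) =====
-- stated objective: simpler
-- what changed: Replaces A's interleaved two-ended in-place loop over one mutable list (each cell computed from the previously written cell by a bit_length recurrence) with standalone closed-form powers of two: front[k]=2**(lo.bit_length()+k*inc-1), back[k]=2**((hi-1).bit_length()-k*inc), built as two comprehensions and concatenated, with the odd middle as the average of the two adjacent closed-form values.
-- outside the precondition, e.g. on get_unit_sequence(0, 1, 2): A returns [0, 0.5, 1, 1], B returns [0, 0.5, 1, 1]; on get_unit_sequence(2, 3, -3): A returns [2, 2], B returns [2, 2, 3]; on get_unit_sequence(1, 1, -1): A raises ZeroDivisionError, B raises ZeroDivisionError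
import Mathlib
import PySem

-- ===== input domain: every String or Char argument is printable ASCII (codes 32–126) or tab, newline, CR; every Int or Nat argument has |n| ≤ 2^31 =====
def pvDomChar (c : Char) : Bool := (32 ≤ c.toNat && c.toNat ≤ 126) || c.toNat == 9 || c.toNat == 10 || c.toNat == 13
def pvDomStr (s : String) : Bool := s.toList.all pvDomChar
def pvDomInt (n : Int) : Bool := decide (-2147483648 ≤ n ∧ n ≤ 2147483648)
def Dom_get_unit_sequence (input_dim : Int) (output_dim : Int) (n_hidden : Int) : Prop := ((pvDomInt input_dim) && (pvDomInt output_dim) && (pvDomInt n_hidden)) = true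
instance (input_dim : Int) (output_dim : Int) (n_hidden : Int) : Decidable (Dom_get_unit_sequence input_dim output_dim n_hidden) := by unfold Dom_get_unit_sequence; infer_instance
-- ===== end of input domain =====

-- B replaces A's interleaved two-ended in-place recurrence loop by standalone closed-form
-- powers of two assembled from two comprehensions (objective: simpler).

-- Python `2 ** e`; exact for 0 ≤ e (on negative e Python's result is a float; Pre_ keeps every exponent ≥ 0)
def pvPow2 (e : Int) : Int := 2 ^ e.toNat
-- Python `x.bit_length()` as an Int
def pvBL (x : Int) : Int := (PySem.Int.bitLength x : Int)

-- ===== PORT A =====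
def get_unit_sequence (input_dim : Int) (output_dim : Int) (n_hidden : Int) : List Int :=
  let reverse : Bool := decide (input_dim > output_dim)
  let p := if input_dim > output_dim then (output_dim, input_dim) else (input_dim, output_dim)
  let input_dim := p.1
  let output_dim := p.2
  let diff := |pvBL output_dim - pvBL input_dim|
  let increment := PySem.Int.floordiv diff (n_hidden + 1)
  let sequence : List Int := [input_dim] ++ List.replicate n_hidden.toNat 0 ++ [output_dim]
  let sequence := (List.range (PySem.Int.floordiv n_hidden 2).toNat).foldl (fun (s : List Int) (idx : Nat) =>
      let s := PySem.List.pySetD s ((idx : Int) + 1)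
                 (pvPow2 (pvBL (PySem.List.pyGetD s (idx : Int) 0) + increment - 1))
      PySem.List.pySetD s (-2 - (idx : Int))
                 (pvPow2 (pvBL (PySem.List.pyGetD s (-1 - (idx : Int)) 0 - 1) - increment))) sequence
  let sequence := if PySem.Int.mod n_hidden 2 == 1 then
      PySem.List.pySetD sequence (PySem.Int.floordiv n_hidden 2 + 1)
        (PySem.Int.floordiv
          (PySem.List.pyGetD sequence (PySem.Int.floordiv n_hidden 2) 0 +
           PySem.List.pyGetD sequence (PySem.Int.floordiv n_hidden 2 + 2) 0) 2)
    else sequence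
  if reverse then sequence.reverse else sequence

-- ===== PORT B =====
def get_unit_sequence_alt (input_dim : Int) (output_dim : Int) (n_hidden : Int) : List Int :=
  let rev : Bool := decide (input_dim > output_dim)
  let lo := if input_dim > output_dim then output_dim else input_dim
  let hi := if input_dim > output_dim then input_dim else output_dim
  let increment := PySem.Int.floordiv (|pvBL hi - pvBL lo|) (n_hidden + 1)
  let half := PySem.Int.floordiv n_hidden 2
  let front := (List.range' 1 half.toNat).map (fun (k : Nat) => pvPow2 (pvBL lo + (k : Int) * increment - 1))
  let back := (List.range' 1 half.toNat).map (fun (k : Nat) => pvPow2 (pvBL (hi - 1) - (k : Int) * increment))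
  let mid : List Int := if PySem.Int.mod n_hidden 2 == 1 then
      [PySem.Int.floordiv (front.getLastD lo + back.getLastD hi) 2]
    else []
  let seq := [lo] ++ front ++ mid ++ back.reverse ++ [hi]
  if rev then seq.reverse else seq

-- ===== PRECONDITION & SPEC =====
-- Pre_ admits the inputs on which A produces a list of integers other than by accident: non-negative
-- hidden counts whose smoothing exponents stay non-negative, plus the trivial even negative counts;
-- outside it A raises (ZeroDivisionError at n_hidden = -1, IndexError at odd n_hidden <= -5),
-- returns Python floats (2 ** negative exponent), or returns leftover loop state (odd n_hidden = -3).
def Pre_get_unit_sequence (input_dim : Int) (output_dim : Int) (n_hidden : Int) : Prop :=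
  if 0 ≤ n_hidden then
    (let lo := if input_dim > output_dim then output_dim else input_dim
     let hi := if input_dim > output_dim then input_dim else output_dim
     let L := PySem.Int.bitLength lo
     let H := PySem.Int.bitLength hi
     let inc := (H - L + (L - H)) / (n_hidden.toNat + 1)
     n_hidden.toNat / 2 * inc ≤ PySem.Int.bitLength (hi - 1) ∧
       (n_hidden.toNat / 2 = 0 ∨ lo ≠ 0 ∨ 1 ≤ inc))
  else PySem.Int.mod n_hidden 2 = 0
instance (input_dim : Int) (output_dim : Int) (n_hidden : Int) : Decidable (Pre_get_unit_sequence input_dim output_dim n_hidden) := by unfold Pre_get_unit_sequence; infer_instance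

def pvWitness_get_unit_sequence : Int × Int × Int := (1, 1024, 4)

def Spec_get_unit_sequence (input_dim : Int) (output_dim : Int) (n_hidden : Int) (out : List Int) : Prop := out = get_unit_sequence_alt input_dim output_dim n_hidden
instance (input_dim : Int) (output_dim : Int) (n_hidden : Int) (out : List Int) : Decidable (Spec_get_unit_sequence input_dim output_dim n_hidden out) := by unfold Spec_get_unit_sequence; infer_instance

-- ===== CLAIM (what is proved, stated in full; the proofs are below) =====
def Claim_equal_get_unit_sequence : Prop := ∀ (input_dim : Int) (output_dim : Int) (n_hidden : Int), Dom_get_unit_sequence input_dim output_dim n_hidden → Pre_get_unit_sequence input_dim output_dim n_hidden → Spec_get_unit_sequence input_dim output_dim n_hidden (get_unit_sequence input_dim output_dim n_hidden)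

-- ===== LEMMAS AND PROOFS =====

-- bit-length facts
theorem pvBL_pos (x : Int) (hx : x ≠ 0) : 1 ≤ PySem.Int.bitLength x := by
  by_contra h
  have h0 : PySem.Int.bitLength x = 0 := by omega
  have := PySem.Int.lt_two_pow_bitLength x
  rw [h0] at this
  simp at this
  omega

theorem pvBL_two_pow (e : Nat) : PySem.Int.bitLength ((2 : Int) ^ e) = e + 1 := by
  have h1 := PySem.Int.lt_two_pow_bitLength ((2 : Int) ^ e)
  have h2 := PySem.Int.two_pow_bitLength_le ((2 : Int) ^ e) (by positivity)
  have hna : ((2 : Int) ^ e).natAbs = 2 ^ e := by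
    simp [Int.natAbs_pow]
  rw [hna] at h1 h2
  have hb1 : e < PySem.Int.bitLength ((2 : Int) ^ e) := (Nat.pow_lt_pow_iff_right (by omega)).mp h1
  have hb2 : PySem.Int.bitLength ((2 : Int) ^ e) - 1 ≤ e := (Nat.pow_le_pow_iff_right (by omega)).mp h2
  omega

theorem pvBL_two_pow_pred (e : Nat) : PySem.Int.bitLength ((2 : Int) ^ e - 1) = e := by
  cases e with
  | zero => simp [PySem.Int.bitLength_zero]
  | succ m =>
    have hpos : (1 : Int) ≤ (2 : Int) ^ (m + 1) - 1 := by
      have : (2 : Int) ^ 1 ≤ (2 : Int) ^ (m + 1) := pow_le_pow_right₀ (by norm_num) (by omega)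
      simp at this; omega
    have hna : ((2 : Int) ^ (m + 1) - 1).natAbs = 2 ^ (m + 1) - 1 := by
      have : ((2 : Int) ^ (m + 1) - 1) = ((2 ^ (m + 1) - 1 : Nat) : Int) := by
        push_cast [Nat.one_le_two_pow]; ring
      rw [this, Int.natAbs_natCast]
    have h1 := PySem.Int.lt_two_pow_bitLength ((2 : Int) ^ (m + 1) - 1)
    have h2 := PySem.Int.two_pow_bitLength_le ((2 : Int) ^ (m + 1) - 1) (by omega)
    rw [hna] at h1 h2
    have hp : 1 ≤ 2 ^ (m + 1) := Nat.one_le_two_pow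
    have hb1 : 2 ^ (m + 1) ≤ 2 ^ PySem.Int.bitLength ((2 : Int) ^ (m + 1) - 1) := by
      have : 2 ^ (m + 1) - 1 < 2 ^ PySem.Int.bitLength ((2 : Int) ^ (m + 1) - 1) := h1
      omega
    have hb1' : m + 1 ≤ PySem.Int.bitLength ((2 : Int) ^ (m + 1) - 1) :=
      (Nat.pow_le_pow_iff_right (by omega)).mp hb1
    have hb2 : 2 ^ (PySem.Int.bitLength ((2 : Int) ^ (m + 1) - 1) - 1) < 2 ^ (m + 1) := by omega
    have hb2' : PySem.Int.bitLength ((2 : Int) ^ (m + 1) - 1) - 1 < m + 1 :=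
      (Nat.pow_lt_pow_iff_right (by omega)).mp hb2
    omega

-- closed-form blocks used by the invariant (blL, blH1 are the Nat bit lengths of lo and hi-1)
def pvF (blL inc k : Nat) : List Int := (List.range k).map (fun j => (2 : Int) ^ (blL + (j + 1) * inc - 1))
def pvB (blH1 inc k : Nat) : List Int := (List.range k).map (fun j => (2 : Int) ^ (blH1 - (j + 1) * inc))

theorem pvF_succ (blL inc k : Nat) :
    pvF blL inc (k + 1) = pvF blL inc k ++ [(2 : Int) ^ (blL + (k + 1) * inc - 1)] := by
  simp [pvF, List.range_succ]

theorem pvB_succ (blH1 inc k : Nat) :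
    pvB blH1 inc (k + 1) = pvB blH1 inc k ++ [(2 : Int) ^ (blH1 - (k + 1) * inc)] := by
  simp [pvB, List.range_succ]

theorem pvF_length (blL inc k : Nat) : (pvF blL inc k).length = k := by simp [pvF]
theorem pvB_length (blH1 inc k : Nat) : (pvB blH1 inc k).length = k := by simp [pvB]

-- set at the length of the prefix replaces the head of the suffix
theorem pv_set_append {α : Type} (xs zs : List α) (y v : α) :
    (xs ++ y :: zs).set xs.length v = xs ++ v :: zs := by
  induction xs with
  | nil => simp
  | cons a as ih => simp [ih]

-- getD at the length of the prefix reads the head of the suffix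
theorem pv_getD_append {α : Type} (xs zs : List α) (y d : α) :
    (xs ++ y :: zs).getD xs.length d = y := by
  induction xs with
  | nil => simp
  | cons a as ih => simpa using ih

-- pySetD with an in-range negative index
theorem pv_pySetD_neg {α : Type} (xs : List α) (k : Nat) (v : α) (hk : 0 < k) (hk' : k ≤ xs.length) :
    PySem.List.pySetD xs (-(k : Int)) v = xs.set (xs.length - k) v := by
  simp only [PySem.List.pySetD, PySem.List.pySet?, PySem.List.pyIdx?]
  have h1 : ¬ (0 ≤ -(k : Int)) := by omega
  have h2 : -(xs.length : Int) ≤ -(k : Int) := by omega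
  simp only [if_neg h1, if_pos h2]
  have : ((xs.length : Int) + -(k : Int)).toNat = xs.length - k := by omega
  simp [this]

-- the value read by the forward pass at index k (lo itself, then the previous power of two)
def pvRF (lo : Int) (L inc k : Nat) : Int := if k = 0 then lo else 2 ^ (L + k * inc - 1)
-- the value read by the backward pass at index -1-k (hi itself, then the previous power of two)
def pvRB (hi : Int) (H1 inc k : Nat) : Int := if k = 0 then hi else 2 ^ (H1 - k * inc)

theorem pv_pyGetD_neg_append {α : Type} (xs zs : List α) (y d : α) :
    PySem.List.pyGetD (xs ++ y :: zs) (-((zs.length : Int) + 1)) d = y := by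
  have hidx : (-((zs.length : Int) + 1)) = -((zs.length + 1 : Nat) : Int) := by push_cast; ring
  rw [hidx, PySem.List.pyGetD_neg_natCast _ _ _ (by omega) (by simp)]
  simp [show (xs ++ y :: zs).length - (zs.length + 1) = xs.length from by simp,
    List.getElem_append_right]

theorem pv_pySetD_neg_append {α : Type} (xs zs : List α) (y v : α) :
    PySem.List.pySetD (xs ++ y :: zs) (-((zs.length : Int) + 1)) v = xs ++ v :: zs := by
  have hidx : (-((zs.length : Int) + 1)) = -((zs.length + 1 : Nat) : Int) := by push_cast; ring
  rw [hidx, pv_pySetD_neg _ _ _ (by omega) (by simp)]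
  rw [show (xs ++ y :: zs).length - (zs.length + 1) = xs.length from by simp, pv_set_append]

theorem pv_pyGetD_append_left {α : Type} (xs ys : List α) (n : Nat) (d : α) (h : n < xs.length) :
    PySem.List.pyGetD (xs ++ ys) (n : Int) d = xs.getD n d := by
  rw [PySem.List.pyGetD_natCast]
  simp [List.getD_eq_getElem?_getD, List.getElem?_append_left h]

-- the last element of [lo] ++ pvF … k
theorem pv_front_last (lo : Int) (L inc k : Nat) :
    ([lo] ++ pvF L inc k).getD k 0 = pvRF lo L inc k := by
  cases k with
  | zero => simp [pvF, pvRF]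
  | succ j =>
    rw [pvF_succ, pvRF, if_neg (by omega), ← List.append_assoc]
    have hlen : ([lo] ++ pvF L inc j).length = j + 1 := by simp [pvF_length]
    have h := pv_getD_append ([lo] ++ pvF L inc j) [] ((2 : Int) ^ (L + (j + 1) * inc - 1)) 0
    rw [hlen] at h
    simpa using h

-- (pvB … k).reverse ++ [hi] starts with pvRB … k, followed by a tail of length k
theorem pvB_rev_cons (hi : Int) (H1 inc k : Nat) :
    ∃ t : List Int, (pvB H1 inc k).reverse ++ [hi] = pvRB hi H1 inc k :: t ∧ t.length = k := by
  cases k with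
  | zero => exact ⟨[], by simp [pvB, pvRB], by simp⟩
  | succ j =>
    refine ⟨(pvB H1 inc j).reverse ++ [hi], ?_, by simp [pvB_length]⟩
    rw [pvB_succ, pvRB, if_neg (by omega)]
    simp

-- bit length of the forward read value
theorem pvBL_pvRF (lo : Int) (inc k : Nat)
    (hLI : 1 ≤ PySem.Int.bitLength lo + inc) :
    PySem.Int.bitLength (pvRF lo (PySem.Int.bitLength lo) inc k) = PySem.Int.bitLength lo + k * inc := by
  cases k with
  | zero => simp [pvRF]
  | succ j =>
    rw [pvRF, if_neg (by omega), pvBL_two_pow]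
    have h := Nat.le_mul_of_pos_left inc (show 0 < j + 1 from by omega)
    omega

-- the loop invariant: after k iterations the state is the closed-form decomposition
theorem pv_loop_inv (lo hi : Int) (n : Nat) (inc : Nat)
    (hpos : 1 ≤ PySem.Int.bitLength lo + inc ∨ n / 2 = 0)
    (hinc : n / 2 * inc ≤ PySem.Int.bitLength (hi - 1)) (k : Nat) (hk : k ≤ n / 2) :
    (List.range k).foldl (fun (s : List Int) (idx : Nat) =>
        let s := PySem.List.pySetD s ((idx : Int) + 1)
                   (pvPow2 (pvBL (PySem.List.pyGetD s (idx : Int) 0) +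
                     (inc : Nat) - 1))
        PySem.List.pySetD s (-2 - (idx : Int))
                   (pvPow2 (pvBL (PySem.List.pyGetD s (-1 - (idx : Int)) 0 - 1) -
                     (inc : Nat))))
      ([lo] ++ List.replicate n 0 ++ [hi]) =
    [lo] ++ pvF (PySem.Int.bitLength lo) inc k
        ++ List.replicate (n - 2 * k) 0
        ++ (pvB (PySem.Int.bitLength (hi - 1)) inc k).reverse
        ++ [hi] := by
  induction k with
  | zero => simp [pvF, pvB]
  | succ k ih =>
    have hk2 : 2 * k + 2 ≤ n := by omega
    have hLI : 1 ≤ PySem.Int.bitLength lo + inc := by rcases hpos with h | h; exact h; omega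
    rw [List.range_succ, List.foldl_append, ih (by omega), List.foldl_cons, List.foldl_nil]
    dsimp only
    set L := PySem.Int.bitLength lo with hLdef
    set H1 := PySem.Int.bitLength (hi - 1) with hH1def
    have hbound : (k + 1) * inc ≤ H1 := by
      have h2 : (k + 1) * inc ≤ n / 2 * inc := Nat.mul_le_mul_right inc (by omega)
      omega
    have hzsplit : List.replicate (n - 2 * k) (0 : Int) =
        0 :: (List.replicate (n - 2 * k - 2) 0 ++ [0]) := by
      have haux : ∀ m : Nat, n - 2 * k = m + 2 →
          List.replicate (n - 2 * k) (0 : Int) = 0 :: (List.replicate m 0 ++ [0]) := by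
        intro m hm
        rw [hm, List.replicate_succ, List.replicate_succ']
      exact haux (n - 2 * k - 2) (by omega)
    -- step 1: the forward read
    have hr1 : PySem.List.pyGetD
        ([lo] ++ pvF L inc k ++ List.replicate (n - 2 * k) 0 ++ (pvB H1 inc k).reverse ++ [hi])
        (k : Int) 0 = pvRF lo L inc k := by
      rw [show [lo] ++ pvF L inc k ++ List.replicate (n - 2 * k) (0 : Int) ++ (pvB H1 inc k).reverse ++ [hi]
            = ([lo] ++ pvF L inc k) ++ (List.replicate (n - 2 * k) 0 ++ ((pvB H1 inc k).reverse ++ [hi]))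
          from by simp]
      rw [pv_pyGetD_append_left _ _ k 0 (by simp [pvF_length])]
      exact pv_front_last lo L inc k
    rw [hr1]
    -- step 2: the forward write value
    have hv1 : pvPow2 (pvBL (pvRF lo L inc k) + (inc : Int) - 1) = (2 : Int) ^ (L + (k + 1) * inc - 1) := by
      unfold pvPow2 pvBL
      rw [pvBL_pvRF lo inc k hLI, ← hLdef]
      rw [show (k + 1) * inc = k * inc + inc from by ring]
      congr 1
      omega
    rw [hv1]
    -- step 3: the forward write
    have hs1 : PySem.List.pySetD
        ([lo] ++ pvF L inc k ++ List.replicate (n - 2 * k) 0 ++ (pvB H1 inc k).reverse ++ [hi])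
        ((k : Int) + 1) ((2 : Int) ^ (L + (k + 1) * inc - 1)) =
        ([lo] ++ pvF L inc k) ++ (2 : Int) ^ (L + (k + 1) * inc - 1) ::
          (List.replicate (n - 2 * k - 2) 0 ++ [0] ++ ((pvB H1 inc k).reverse ++ [hi])) := by
      rw [show ((k : Int) + 1) = ((k + 1 : Nat) : Int) from by push_cast; ring]
      rw [show [lo] ++ pvF L inc k ++ List.replicate (n - 2 * k) (0 : Int) ++ (pvB H1 inc k).reverse ++ [hi]
            = ([lo] ++ pvF L inc k) ++ 0 :: (List.replicate (n - 2 * k - 2) 0 ++ [0] ++ ((pvB H1 inc k).reverse ++ [hi]))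
          from by rw [hzsplit]; simp]
      rw [PySem.List.pySetD_natCast,
          show k + 1 = ([lo] ++ pvF L inc k).length from by simp [pvF_length],
          pv_set_append]
    rw [hs1]
    -- step 4: the backward read
    obtain ⟨t, ht, htlen⟩ := pvB_rev_cons hi H1 inc k
    have hr2 : PySem.List.pyGetD
        (([lo] ++ pvF L inc k) ++ (2 : Int) ^ (L + (k + 1) * inc - 1) ::
          (List.replicate (n - 2 * k - 2) 0 ++ [0] ++ ((pvB H1 inc k).reverse ++ [hi])))
        (-1 - (k : Int)) 0 = pvRB hi H1 inc k := by
      rw [show (([lo] ++ pvF L inc k) ++ (2 : Int) ^ (L + (k + 1) * inc - 1) ::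
            (List.replicate (n - 2 * k - 2) 0 ++ [0] ++ ((pvB H1 inc k).reverse ++ [hi])))
            = (([lo] ++ pvF L inc k) ++ (2 : Int) ^ (L + (k + 1) * inc - 1) ::
               (List.replicate (n - 2 * k - 2) 0 ++ [0])) ++ (pvRB hi H1 inc k :: t)
          from by rw [← ht]; simp]
      rw [show (-1 - (k : Int)) = -((t.length : Int) + 1) from by rw [htlen]; push_cast; ring]
      exact pv_pyGetD_neg_append _ t _ 0
    rw [hr2]
    -- step 5: the backward write value
    have hv2 : pvPow2 (pvBL (pvRB hi H1 inc k - 1) - (inc : Int)) = (2 : Int) ^ (H1 - (k + 1) * inc) := by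
      unfold pvPow2 pvBL
      cases k with
      | zero =>
        rw [pvRB, if_pos rfl, ← hH1def,
            show (0 + 1) * inc = inc from by ring]
        have hb1 : inc ≤ H1 := by
          have := hbound
          omega
        congr 1
        omega
      | succ j =>
        rw [pvRB, if_neg (by omega), pvBL_two_pow_pred,
            show (j + 1 + 1) * inc = (j + 1) * inc + inc from by ring]
        have hb2 : (j + 1) * inc + inc ≤ H1 := by
          have h := hbound
          have he : (j + 1 + 1) * inc = (j + 1) * inc + inc := by ring
          omega
        congr 1
        omega
    rw [hv2]
    -- step 6: the backward write
    have hs2 : PySem.List.pySetD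
        (([lo] ++ pvF L inc k) ++ (2 : Int) ^ (L + (k + 1) * inc - 1) ::
          (List.replicate (n - 2 * k - 2) 0 ++ [0] ++ ((pvB H1 inc k).reverse ++ [hi])))
        (-2 - (k : Int)) ((2 : Int) ^ (H1 - (k + 1) * inc)) =
        ([lo] ++ pvF L inc (k + 1)) ++ (List.replicate (n - 2 * (k + 1)) 0 ++ ((pvB H1 inc (k + 1)).reverse ++ [hi])) := by
      rw [show (([lo] ++ pvF L inc k) ++ (2 : Int) ^ (L + (k + 1) * inc - 1) ::
            (List.replicate (n - 2 * k - 2) 0 ++ [0] ++ ((pvB H1 inc k).reverse ++ [hi])))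
            = (([lo] ++ pvF L inc k) ++ (2 : Int) ^ (L + (k + 1) * inc - 1) ::
               List.replicate (n - 2 * k - 2) 0) ++ ((0 : Int) :: ((pvB H1 inc k).reverse ++ [hi]))
          from by simp]
      rw [show (-2 - (k : Int)) = -((((pvB H1 inc k).reverse ++ [hi]).length : Int) + 1)
          from by simp [pvB_length]; push_cast; ring]
      rw [pv_pySetD_neg_append]
      rw [pvF_succ, pvB_succ]
      simp [show n - 2 * (k + 1) = n - 2 * k - 2 from by omega]
    rw [hs2]
    simp

theorem pv_pyGetD_boundary {α : Type} (xs zs : List α) (y d : α) :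
    PySem.List.pyGetD (xs ++ y :: zs) ((xs.length : Nat) : Int) d = y := by
  rw [PySem.List.pyGetD_natCast]
  exact pv_getD_append xs zs y d

theorem pv_front_eq (lo : Int) (inc hf : Nat)
    (hLI : 1 ≤ PySem.Int.bitLength lo + inc ∨ hf = 0) :
    (List.range' 1 hf).map (fun (k : Nat) => pvPow2 (pvBL lo + (k : Int) * ((inc : Nat) : Int) - 1)) =
    pvF (PySem.Int.bitLength lo) inc hf := by
  rw [List.range'_eq_map_range, List.map_map]
  apply List.map_congr_left
  intro j hj
  rcases hLI with hLI | h0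
  · simp only [Function.comp]
    unfold pvPow2 pvBL
    congr 1
    rw [show ((1 + j : Nat) : Int) * ((inc : Nat) : Int) = (((1 + j) * inc : Nat) : Int) from by push_cast; ring,
        show (1 + j) * inc = (j + 1) * inc from by ring]
    have h := Nat.le_mul_of_pos_left inc (show 0 < j + 1 from by omega)
    omega
  · rw [h0] at hj
    simp at hj

theorem pv_back_eq (hi : Int) (inc hf : Nat) (hb : hf * inc ≤ PySem.Int.bitLength (hi - 1)) :
    (List.range' 1 hf).map (fun (k : Nat) => pvPow2 (pvBL (hi - 1) - (k : Int) * ((inc : Nat) : Int))) =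
    pvB (PySem.Int.bitLength (hi - 1)) inc hf := by
  rw [List.range'_eq_map_range, List.map_map]
  apply List.map_congr_left
  intro j hj
  rw [List.mem_range] at hj
  have hj1 : (1 + j) * inc ≤ hf * inc := Nat.mul_le_mul_right inc (by omega)
  simp only [Function.comp]
  unfold pvPow2 pvBL
  congr 1
  rw [show ((1 + j : Nat) : Int) * ((inc : Nat) : Int) = (((1 + j) * inc : Nat) : Int) from by push_cast; ring,
      show (1 + j) * inc = (j + 1) * inc from by ring]
  rw [show (1 + j) * inc = (j + 1) * inc from by ring] at hj1
  omega

theorem pvF_getLastD (lo : Int) (L inc k : Nat) :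
    (pvF L inc k).getLastD lo = pvRF lo L inc k := by
  cases k with
  | zero => simp [pvF, pvRF]
  | succ j => rw [pvF_succ, pvRF, if_neg (by omega)]; simp

theorem pvB_getLastD (hi : Int) (H1 inc k : Nat) :
    (pvB H1 inc k).getLastD hi = pvRB hi H1 inc k := by
  cases k with
  | zero => simp [pvB, pvRB]
  | succ j => rw [pvB_succ, pvRB, if_neg (by omega)]; simp

-- the common core: for 1 ≤ lo ≤ hi and 0 ≤ n, A's post-swap pipeline equals B's closed form
theorem pv_core (lo hi : Int) (n : Int) (hn : 0 ≤ n)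
    (hpre1 : n.toNat / 2 *
        ((PySem.Int.bitLength hi - PySem.Int.bitLength lo +
          (PySem.Int.bitLength lo - PySem.Int.bitLength hi)) / (n.toNat + 1)) ≤
      PySem.Int.bitLength (hi - 1))
    (hpre2 : n.toNat / 2 = 0 ∨ lo ≠ 0 ∨
      1 ≤ (PySem.Int.bitLength hi - PySem.Int.bitLength lo +
           (PySem.Int.bitLength lo - PySem.Int.bitLength hi)) / (n.toNat + 1)) :
    (let diff := |pvBL hi - pvBL lo|
     let increment := PySem.Int.floordiv diff (n + 1)
     let sequence : List Int := [lo] ++ List.replicate n.toNat 0 ++ [hi]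
     let sequence := (List.range (PySem.Int.floordiv n 2).toNat).foldl (fun (s : List Int) (idx : Nat) =>
         let s := PySem.List.pySetD s ((idx : Int) + 1)
                    (pvPow2 (pvBL (PySem.List.pyGetD s (idx : Int) 0) + increment - 1))
         PySem.List.pySetD s (-2 - (idx : Int))
                    (pvPow2 (pvBL (PySem.List.pyGetD s (-1 - (idx : Int)) 0 - 1) - increment))) sequence
     let sequence := if PySem.Int.mod n 2 == 1 then
         PySem.List.pySetD sequence (PySem.Int.floordiv n 2 + 1)
           (PySem.Int.floordiv
             (PySem.List.pyGetD sequence (PySem.Int.floordiv n 2) 0 +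
              PySem.List.pyGetD sequence (PySem.Int.floordiv n 2 + 2) 0) 2)
       else sequence
     sequence) =
    (let increment := PySem.Int.floordiv (|pvBL hi - pvBL lo|) (n + 1)
     let half := PySem.Int.floordiv n 2
     let front := (List.range' 1 half.toNat).map (fun (k : Nat) => pvPow2 (pvBL lo + (k : Int) * increment - 1))
     let back := (List.range' 1 half.toNat).map (fun (k : Nat) => pvPow2 (pvBL (hi - 1) - (k : Int) * increment))
     let mid : List Int := if PySem.Int.mod n 2 == 1 then
         [PySem.Int.floordiv (front.getLastD lo + back.getLastD hi) 2]
       else []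
     [lo] ++ front ++ mid ++ back.reverse ++ [hi]) := by
  obtain ⟨N, rfl⟩ : ∃ N : Nat, n = (N : Int) := ⟨n.toNat, by omega⟩
  rw [Int.toNat_natCast] at hpre1 hpre2
  dsimp only
  have hdiff : |pvBL hi - pvBL lo| =
      ((PySem.Int.bitLength hi - PySem.Int.bitLength lo +
        (PySem.Int.bitLength lo - PySem.Int.bitLength hi) : Nat) : Int) := by
    unfold pvBL
    rcases le_total (PySem.Int.bitLength lo) (PySem.Int.bitLength hi) with h | h
    · rw [abs_of_nonneg (by omega)]; omega
    · rw [abs_of_nonpos (by omega)]; omega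
  have hN1 : ((N : Int) + 1) = ((N + 1 : Nat) : Int) := by push_cast; ring
  have hincr : PySem.Int.floordiv ((PySem.Int.bitLength hi - PySem.Int.bitLength lo +
        (PySem.Int.bitLength lo - PySem.Int.bitLength hi) : Nat) : Int) ((N : Int) + 1) =
      (((PySem.Int.bitLength hi - PySem.Int.bitLength lo +
         (PySem.Int.bitLength lo - PySem.Int.bitLength hi)) / (N + 1) : Nat) : Int) := by
    rw [hN1, PySem.Int.floordiv_natCast]
  have hhalf : PySem.Int.floordiv (N : Int) 2 = ((N / 2 : Nat) : Int) := by
    rw [show (2 : Int) = ((2 : Nat) : Int) from rfl, PySem.Int.floordiv_natCast]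
  have hmod : PySem.Int.mod (N : Int) 2 = ((N % 2 : Nat) : Int) := by
    rw [show (2 : Int) = ((2 : Nat) : Int) from rfl, PySem.Int.mod_natCast]
  rw [hdiff, hincr, hhalf, hmod]
  simp only [Int.toNat_natCast, Int.toNat_natCast]
  -- positivity of the forward exponents (from the precondition)
  have hpos : 1 ≤ PySem.Int.bitLength lo +
      ((PySem.Int.bitLength hi - PySem.Int.bitLength lo +
        (PySem.Int.bitLength lo - PySem.Int.bitLength hi)) / (N + 1)) ∨ N / 2 = 0 := by
    rcases hpre2 with h | h | h
    · exact Or.inr h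
    · exact Or.inl (le_trans (pvBL_pos lo h) (Nat.le_add_right _ _))
    · exact Or.inl (le_trans h (Nat.le_add_left _ _))
  rw [pv_loop_inv lo hi N ((PySem.Int.bitLength hi - PySem.Int.bitLength lo +
        (PySem.Int.bitLength lo - PySem.Int.bitLength hi)) / (N + 1)) hpos hpre1 (N / 2) (le_refl _)]
  rw [pv_front_eq lo _ _ hpos, pv_back_eq hi _ _ hpre1]
  set L := PySem.Int.bitLength lo with hLdef
  set H1 := PySem.Int.bitLength (hi - 1) with hH1def
  set inc := (PySem.Int.bitLength hi - L + (L - PySem.Int.bitLength hi)) / (N + 1) with hincdef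
  set hf := N / 2 with hhfdef
  have hpar : N % 2 = 0 ∨ N % 2 = 1 := by omega
  rcases hpar with hp | hp
  · -- even: no middle element
    rw [hp]
    have hz : N - 2 * hf = 0 := by omega
    simp [hz]
  · -- odd: the middle element is written
    rw [hp]
    have hz : N - 2 * hf = 1 := by omega
    rw [hz]
    simp only [List.replicate_one, beq_iff_eq, Nat.cast_one, if_pos rfl]
    -- the two reads
    obtain ⟨t, ht, htlen⟩ := pvB_rev_cons hi H1 inc hf
    have hr1 : PySem.List.pyGetD
        ([lo] ++ pvF L inc hf ++ [(0 : Int)] ++ (pvB H1 inc hf).reverse ++ [hi])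
        ((hf : Nat) : Int) 0 = pvRF lo L inc hf := by
      rw [show [lo] ++ pvF L inc hf ++ [(0 : Int)] ++ (pvB H1 inc hf).reverse ++ [hi]
            = ([lo] ++ pvF L inc hf) ++ ([(0 : Int)] ++ ((pvB H1 inc hf).reverse ++ [hi]))
          from by simp]
      rw [pv_pyGetD_append_left _ _ hf 0 (by simp [pvF_length])]
      exact pv_front_last lo L inc hf
    have hr2 : PySem.List.pyGetD
        ([lo] ++ pvF L inc hf ++ [(0 : Int)] ++ (pvB H1 inc hf).reverse ++ [hi])
        (((hf : Nat) : Int) + 2) 0 = pvRB hi H1 inc hf := by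
      rw [show [lo] ++ pvF L inc hf ++ [(0 : Int)] ++ (pvB H1 inc hf).reverse ++ [hi]
            = ([lo] ++ pvF L inc hf ++ [(0 : Int)]) ++ (pvRB hi H1 inc hf :: t)
          from by rw [← ht]; simp]
      rw [show (((hf : Nat) : Int) + 2) = ((([lo] ++ pvF L inc hf ++ [(0 : Int)]).length : Nat) : Int)
          from by simp [pvF_length]; push_cast; ring]
      exact pv_pyGetD_boundary _ _ _ _
    rw [hr1, hr2]
    -- the write
    rw [show [lo] ++ pvF L inc hf ++ [(0 : Int)] ++ (pvB H1 inc hf).reverse ++ [hi]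
          = ([lo] ++ pvF L inc hf) ++ (0 : Int) :: ((pvB H1 inc hf).reverse ++ [hi])
        from by simp]
    rw [show ((hf : Nat) : Int) + 1 = (((hf + 1 : Nat)) : Int) from by push_cast; ring,
        PySem.List.pySetD_natCast,
        show hf + 1 = ([lo] ++ pvF L inc hf).length from by simp [pvF_length],
        pv_set_append]
    -- B's middle value
    rw [pvF_getLastD, pvB_getLastD]
    simp

-- negative even n_hidden: both pipelines collapse to [lo, hi]
theorem pv_core_neg (lo hi : Int) (n : Int) (hn : n < 0) (hmod : PySem.Int.mod n 2 = 0) :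
    (let diff := |pvBL hi - pvBL lo|
     let increment := PySem.Int.floordiv diff (n + 1)
     let sequence : List Int := [lo] ++ List.replicate n.toNat 0 ++ [hi]
     let sequence := (List.range (PySem.Int.floordiv n 2).toNat).foldl (fun (s : List Int) (idx : Nat) =>
         let s := PySem.List.pySetD s ((idx : Int) + 1)
                    (pvPow2 (pvBL (PySem.List.pyGetD s (idx : Int) 0) + increment - 1))
         PySem.List.pySetD s (-2 - (idx : Int))
                    (pvPow2 (pvBL (PySem.List.pyGetD s (-1 - (idx : Int)) 0 - 1) - increment))) sequence
     let sequence := if PySem.Int.mod n 2 == 1 then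
         PySem.List.pySetD sequence (PySem.Int.floordiv n 2 + 1)
           (PySem.Int.floordiv
             (PySem.List.pyGetD sequence (PySem.Int.floordiv n 2) 0 +
              PySem.List.pyGetD sequence (PySem.Int.floordiv n 2 + 2) 0) 2)
       else sequence
     sequence) =
    (let increment := PySem.Int.floordiv (|pvBL hi - pvBL lo|) (n + 1)
     let half := PySem.Int.floordiv n 2
     let front := (List.range' 1 half.toNat).map (fun (k : Nat) => pvPow2 (pvBL lo + (k : Int) * increment - 1))
     let back := (List.range' 1 half.toNat).map (fun (k : Nat) => pvPow2 (pvBL (hi - 1) - (k : Int) * increment))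
     let mid : List Int := if PySem.Int.mod n 2 == 1 then
         [PySem.Int.floordiv (front.getLastD lo + back.getLastD hi) 2]
       else []
     [lo] ++ front ++ mid ++ back.reverse ++ [hi]) := by
  dsimp only
  have hdiv : PySem.Int.floordiv n 2 = n / 2 := PySem.Int.floordiv_eq_ediv_of_pos (by norm_num)
  have ht0 : (PySem.Int.floordiv n 2).toNat = 0 := by rw [hdiv]; omega
  have hn0 : n.toNat = 0 := by omega
  rw [hmod, ht0, hn0]
  simp

-- ===== VERDICT (by name: the statement is the Claim_ definition above) =====
theorem get_unit_sequence_spec : Claim_equal_get_unit_sequence := by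
  intro input_dim output_dim n_hidden _hdom hpre
  unfold Pre_get_unit_sequence at hpre
  unfold Spec_get_unit_sequence get_unit_sequence get_unit_sequence_alt
  by_cases hneg : 0 ≤ n_hidden
  · rw [if_pos hneg] at hpre
    by_cases hsw : input_dim > output_dim
    · simp only [if_pos hsw] at hpre
      have h := pv_core output_dim input_dim n_hidden hneg hpre.1 hpre.2
      simp only [if_pos hsw]
      simp only [] at h ⊢
      rw [h]
    · simp only [if_neg hsw] at hpre
      have h := pv_core input_dim output_dim n_hidden hneg hpre.1 hpre.2
      simp only [if_neg hsw]
      simp only [] at h ⊢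
      rw [h]
  · rw [if_neg hneg] at hpre
    by_cases hsw : input_dim > output_dim
    · have h := pv_core_neg output_dim input_dim n_hidden (by omega) hpre
      simp only [if_pos hsw]
      simp only [] at h ⊢
      rw [h]
    · have h := pv_core_neg input_dim output_dim n_hidden (by omega) hpre
      simp only [if_neg hsw]
      simp only [] at h ⊢
      rw [h]
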